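-- pv_equiv track=rewrite | github.com/dyland88/DIY-Shazam | fingerprinting/audio_fingerprint.py | generate_constellation_map
-- ===== SOURCE A (Python) =====
-- from typing import List, Tuple
--
-- def generate_constellation_map(peaks: List[Tuple[int, int]],
--                                 fan_value: int = 5,
--                                 max_time_delta: int = 200) -> List[Tuple[int, int, int]]:
--     """
--     Creates a constellation map by pairing peaks according to Shazam's algorithm.
--
--     Each peak is paired with up to `fan_value` peaks that occur after it within
--     a time window of `max_time_delta` frames.
--
--     :param peaks: List of (time_idx, freq_idx) tuples
--     :param fan_value: Number of peaks to pair with each anchor peak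
--     :param max_time_delta: Maximum time difference (in frames) between paired peaks
--     :return: List of (freq1, freq2, time_delta) tuples representing the constellation
--     """
--     # Sort peaks by time
--     peaks_sorted = sorted(peaks, key=lambda x: x[0])
--
--     constellation = []
--
--     for i, (t1, f1) in enumerate(peaks_sorted):
--         # Look only at future peaks within the time window
--         fan_count = 0
--         for j in range(i + 1, len(peaks_sorted)):
--             t2, f2 = peaks_sorted[j]
--             time_delta = t2 - t1
--
--             if time_delta > max_time_delta:
--                 break
--
--             # Add this peak pair to constellation
--             # Format: (anchor_freq, target_freq, time_delta)
--             constellation.append((f1, f2, time_delta))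
--             fan_count += 1
--
--             if fan_count >= fan_value:
--                 break
--
--     return constellation
-- ===== SOURCE B (Python) =====
-- from typing import List, Tuple
--
-- def generate_constellation_map(peaks: List[Tuple[int, int]],
--                                 fan_value: int = 5,
--                                 max_time_delta: int = 200) -> List[Tuple[int, int, int]]:
--     # Target-major inversion: walk the sorted peaks once as TARGETS; each target
--     # credits itself backwards to the (at most fan_value) nearest earlier anchors
--     # still within the time window, into one bucket per anchor; the buckets are
--     # flattened at the end, which restores the anchor-major output order.
--     ps = sorted(peaks, key=lambda x: x[0])
--     n = len(ps)
--     buckets = [[] for _ in range(n)]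
--     for j in range(1, n):
--         t2, f2 = ps[j]
--         for i in range(j - 1, max(0, j - fan_value) - 1, -1):
--             t1, f1 = ps[i]
--             if t2 - t1 > max_time_delta:
--                 break
--             buckets[i].append((f1, f2, t2 - t1))
--     return [pair for bucket in buckets for pair in bucket]
-- ===== Notes on version B (the rewrite author's own statement) =====
-- stated objective: alternative
-- what changed: The loop nesting is inverted: instead of scanning forward from each anchor with a fan counter and break, B walks the sorted peaks once as targets, each target crediting itself backwards to its at most fan_value in-window predecessors into per-anchor buckets, which are flattened at the end to restore anchor-major order.
-- intended difference: When fan_value <= 0 and some two peaks are within max_time_delta of each other, A still emits one pair per such anchor (it appends before checking the fan count), while B emits no pairs, which is the intended meaning of pairing each anchor with up to fan_value peaks. — e.g. on generate_constellation_map([(0, 1), (0, 2)], 0, 0): A returns [(1, 2, 0)], B returns []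
import Mathlib
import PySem

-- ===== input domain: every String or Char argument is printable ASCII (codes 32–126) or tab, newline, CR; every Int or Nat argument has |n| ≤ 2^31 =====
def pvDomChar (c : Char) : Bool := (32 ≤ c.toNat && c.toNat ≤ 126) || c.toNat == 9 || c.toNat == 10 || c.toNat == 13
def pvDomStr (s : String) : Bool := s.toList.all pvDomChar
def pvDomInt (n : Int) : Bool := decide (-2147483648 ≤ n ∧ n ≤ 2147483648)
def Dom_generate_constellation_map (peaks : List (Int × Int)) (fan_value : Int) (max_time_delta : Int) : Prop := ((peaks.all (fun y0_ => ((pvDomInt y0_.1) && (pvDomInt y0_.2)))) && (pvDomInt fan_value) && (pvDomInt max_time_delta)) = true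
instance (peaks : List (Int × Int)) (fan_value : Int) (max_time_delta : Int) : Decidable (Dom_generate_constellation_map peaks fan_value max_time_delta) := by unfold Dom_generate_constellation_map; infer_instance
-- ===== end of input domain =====

-- B inverts the loop nesting: one target-major pass credits each peak backwards to its nearest in-window anchors' buckets, flattened at the end (alternative decomposition, same cost; neither version mutates its arguments).


-- ===== PORT A =====
-- inner 'for j in range(i+1, len)' loop: structural recursion over the peaks after the anchor
def pvInnerA (fan_value max_time_delta t1 f1 : Int) : List (Int × Int) → Int → List (Int × Int × Int)
  | [], _ => []
  | (t2, f2) :: rest, fan_count =>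
    let time_delta := t2 - t1
    if time_delta > max_time_delta then []
    else
      (f1, f2, time_delta) ::
        (if fan_count + 1 ≥ fan_value then []
         else pvInnerA fan_value max_time_delta t1 f1 rest (fan_count + 1))

def pvOuterA (fan_value max_time_delta : Int) : List (Int × Int) → List (Int × Int × Int)
  | [] => []
  | (t1, f1) :: rest =>
      pvInnerA fan_value max_time_delta t1 f1 rest 0 ++ pvOuterA fan_value max_time_delta rest

def generate_constellation_map (peaks : List (Int × Int)) (fan_value : Int) (max_time_delta : Int) : List (Int × Int × Int) :=
  pvOuterA fan_value max_time_delta (PySem.List.sorted peaks (fun x => x.1))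

-- ===== PORT B =====
-- inner 'for i in range(j-1, max(0, j-fan_value)-1, -1)' loop with break: recursion over the countdown index list
def pvInnerB (ps : List (Int × Int)) (t2 f2 max_time_delta : Int) :
    List Int → List (List (Int × Int × Int)) → List (List (Int × Int × Int))
  | [], buckets => buckets
  | i :: rest, buckets =>
    match PySem.List.pyGet? ps i with
    | none => buckets          -- unreachable: every i from range(j-1, …, -1) with 1 ≤ j ≤ len(ps) is in bounds
    | some (t1, f1) =>
      if t2 - t1 > max_time_delta then buckets    -- break
      else pvInnerB ps t2 f2 max_time_delta rest
             (buckets.modify i.toNat (fun bucket => bucket ++ [(f1, f2, t2 - t1)]))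

def generate_constellation_map_alt (peaks : List (Int × Int)) (fan_value : Int) (max_time_delta : Int) : List (Int × Int × Int) :=
  let ps := PySem.List.sorted peaks (fun x => x.1)
  let n : Int := ps.length
  let buckets0 : List (List (Int × Int × Int)) := (PySem.List.pyRange 0 n 1).map (fun _ => [])
  let buckets := (PySem.List.pyRange 1 n 1).foldl
    (fun b j =>
      match PySem.List.pyGet? ps j with
      | none => b              -- unreachable: j ∈ range(1, n)
      | some (t2, f2) =>
          pvInnerB ps t2 f2 max_time_delta (PySem.List.pyRange (j - 1) (max 0 (j - fan_value) - 1) (-1)) b)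
    buckets0
  buckets.flatMap (fun bucket => bucket)

-- ===== PRECONDITION & SPEC =====
-- helper for D_: does the (value-)sorted time list contain two adjacent times within delta of each other?
def pvHasClose (mx : Int) : List Int → Bool
  | a :: b :: r => (decide (b - a ≤ mx)) || pvHasClose mx (b :: r)
  | _ => false

-- When fan_value ≤ 0 and two peaks lie within max_time_delta of each other, A still returns one pair per anchor
-- (it appends before checking the fan count) while B returns no pairs, the intended reading of "up to fan_value peaks".
def D_generate_constellation_map (peaks : List (Int × Int)) (fan_value : Int) (max_time_delta : Int) : Prop :=
  fan_value ≤ 0 ∧ pvHasClose max_time_delta (PySem.List.sorted (peaks.map Prod.fst) (fun x => x)) = true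
instance (peaks : List (Int × Int)) (fan_value : Int) (max_time_delta : Int) : Decidable (D_generate_constellation_map peaks fan_value max_time_delta) := by unfold D_generate_constellation_map; infer_instance

def Spec_generate_constellation_map (peaks : List (Int × Int)) (fan_value : Int) (max_time_delta : Int) (out : List (Int × Int × Int)) : Prop := ¬ D_generate_constellation_map peaks fan_value max_time_delta → out = generate_constellation_map_alt peaks fan_value max_time_delta
instance (peaks : List (Int × Int)) (fan_value : Int) (max_time_delta : Int) (out : List (Int × Int × Int)) : Decidable (Spec_generate_constellation_map peaks fan_value max_time_delta out) := by unfold Spec_generate_constellation_map; infer_instance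

def pvDiffWitness_generate_constellation_map : (List (Int × Int)) × Int × Int := ([(0, 1), (0, 2)], 0, 0)
def pvDiffWitnessOut_generate_constellation_map : (List (Int × Int × Int)) × (List (Int × Int × Int)) := ([(1, 2, 0)], [])

-- ===== CLAIM (what is proved, stated in full; the proofs are below) =====
def Claim_unchanged_generate_constellation_map : Prop := ∀ (peaks : List (Int × Int)) (fan_value : Int) (max_time_delta : Int), Dom_generate_constellation_map peaks fan_value max_time_delta → Spec_generate_constellation_map peaks fan_value max_time_delta (generate_constellation_map peaks fan_value max_time_delta)
def Claim_changed_generate_constellation_map : Prop := Dom_generate_constellation_map (pvDiffWitness_generate_constellation_map.1) (pvDiffWitness_generate_constellation_map.2.1) (pvDiffWitness_generate_constellation_map.2.2) ∧ D_generate_constellation_map (pvDiffWitness_generate_constellation_map.1) (pvDiffWitness_generate_constellation_map.2.1) (pvDiffWitness_generate_constellation_map.2.2) ∧ generate_constellation_map (pvDiffWitness_generate_constellation_map.1) (pvDiffWitness_generate_constellation_map.2.1) (pvDiffWitness_generate_constellation_map.2.2) = pvDiffWitnessOut_generate_constellation_map.1 ∧ generate_constellation_map_alt (pvDiffWitness_generate_constellation_map.1)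 (pvDiffWitness_generate_constellation_map.2.1) (pvDiffWitness_generate_constellation_map.2.2) = pvDiffWitnessOut_generate_constellation_map.2 ∧ pvDiffWitnessOut_generate_constellation_map.1 ≠ pvDiffWitnessOut_generate_constellation_map.2
def Claim_exact_generate_constellation_map : Prop := ∀ (peaks : List (Int × Int)) (fan_value : Int) (max_time_delta : Int), Dom_generate_constellation_map peaks fan_value max_time_delta → D_generate_constellation_map peaks fan_value max_time_delta → generate_constellation_map peaks fan_value max_time_delta ≠ generate_constellation_map_alt peaks fan_value max_time_delta

-- ===== LEMMAS AND PROOFS =====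

-- ---------- common canonical form: per-anchor window = takeWhile within the time window, capped at fan_value ----------
def pvS (fan mx : Int) : List (Int × Int) → List (Int × Int × Int)
  | [] => []
  | (t1, f1) :: rest =>
      ((rest.takeWhile (fun q => q.1 ≤ t1 + mx)).take fan.toNat).map (fun q => (f1, q.2, q.1 - t1))
        ++ pvS fan mx rest

def pvBucketA (ps : List (Int × Int)) (fan mx : Int) (i : Nat) : List (Int × Int × Int) :=
  (((ps.drop (i + 1)).takeWhile (fun q => q.1 ≤ (ps[i]!).1 + mx)).take fan.toNat).map
    (fun q => ((ps[i]!).2, q.2, q.1 - (ps[i]!).1))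

-- ---------- generic takeWhile facts ----------
theorem pv_takeWhile_eq_take {α : Type} (p : α → Bool) (l : List α) :
    l.takeWhile p = l.take (l.takeWhile p).length := by
  induction l with
  | nil => rfl
  | cons a t ih =>
    by_cases h : p a
    · rw [List.takeWhile_cons_of_pos h]
      simpa [h] using ih
    · simp [h]

theorem pv_takeWhile_getElem_false {α : Type} (p : α → Bool) (l : List α)
    (h : (l.takeWhile p).length < l.length) :
    p (l[(l.takeWhile p).length]'h) = false := by
  induction l with
  | nil => simp at h
  | cons a t ih =>
    by_cases hp : p a
    · simp [hp] at h ⊢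
      exact ih h
    · simp [hp]

theorem pv_takeWhile_getElem_true {α : Type} (p : α → Bool) (l : List α)
    (j : Nat) (hj : j < l.length) (h : j < (l.takeWhile p).length) :
    p (l[j]'hj) = true := by
  have hpref := List.takeWhile_prefix (l := l) (p := p)
  have heq := hpref.getElem (i := j) (by exact h)
  have : p ((l.takeWhile p)[j]'h) = true := List.mem_takeWhile_imp (List.getElem_mem _)
  rwa [heq] at this

theorem pv_takeWhile_length_eq {α : Type} (p : α → Bool) (l : List α) (c : Nat) (hc : c ≤ l.length)
    (h1 : ∀ (k : Nat) (hk : k < l.length), k < c → p (l[k]'hk) = true)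
    (h2 : ∀ (hcl : c < l.length), p (l[c]'hcl) = false) :
    (l.takeWhile p).length = c := by
  rcases Nat.lt_trichotomy (l.takeWhile p).length c with h | h | h
  · have hlt : (l.takeWhile p).length < l.length := lt_of_lt_of_le h hc
    have hf := pv_takeWhile_getElem_false p l hlt
    have ht := h1 _ hlt h
    rw [hf] at ht; exact absurd ht (by simp)
  · exact h
  · have hcl : c < l.length := lt_of_lt_of_le h (List.takeWhile_sublist _).length_le
    have ht := pv_takeWhile_getElem_true p l c hcl h
    have hf := h2 hcl
    rw [hf] at ht; exact absurd ht (by simp)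

theorem pv_takeWhile_eq_filter {α : Type} (p : α → Bool) (R : α → α → Prop) (l : List α)
    (hl : l.Pairwise R) (h : ∀ a b, R a b → p a = false → p b = false) :
    l.takeWhile p = l.filter p := by
  induction l with
  | nil => rfl
  | cons a t ih =>
    rcases List.pairwise_cons.mp hl with ⟨ha, ht⟩
    by_cases hp : p a
    · simp [hp, ih ht]
    · have hnil : t.filter p = [] := by
        refine List.filter_eq_nil_iff.mpr ?_
        intro b hb
        simp [h a b (ha b hb) (by simpa using hp)]
      simp [hp, hnil]

theorem pv_take_range' (c s n : Nat) : (List.range' s n).take c = List.range' s (min c n) := by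
  induction n generalizing s c with
  | zero => simp
  | succ m ih =>
    cases c with
    | zero => simp
    | succ c' =>
      rw [List.range'_succ, List.take_succ_cons, ih]
      have : min (c' + 1) (m + 1) = min c' m + 1 := by omega
      rw [this, List.range'_succ]

-- ---------- B-side machinery ----------
def pvPr (ps : List (Int × Int)) (i j : Nat) : Int × Int × Int :=
  ((ps[i]!).2, (ps[j]!).2, (ps[j]!).1 - (ps[i]!).1)

def pvStopN (fan : Int) (j : Nat) : Nat := (max 0 ((j : Int) - fan)).toNat

def pvDesc (fan : Int) (j : Nat) : List Nat :=
  (List.range (j - pvStopN fan j)).map (fun k => (j - 1) - k)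

def pvWin (ps : List (Int × Int)) (mx : Int) (j k : Nat) : Bool :=
  decide ((ps[j]!).1 - (ps[k]!).1 ≤ mx)

def pvEmits (ps : List (Int × Int)) (fan mx : Int) (j : Nat) : List (Nat × (Int × Int × Int)) :=
  ((pvDesc fan j).takeWhile (pvWin ps mx j)).map (fun k => (k, pvPr ps k j))

def pvApply (b : List (List (Int × Int × Int))) (L : List (Nat × (Int × Int × Int))) :
    List (List (Int × Int × Int)) :=
  L.foldl (fun b e => b.modify e.1 (fun bucket => bucket ++ [e.2])) b

def pvC (ps : List (Int × Int)) (fan mx : Int) (i j : Nat) : Bool :=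
  decide (max 0 ((j : Int) - fan) ≤ (i : Int)) && decide (i < j) && pvWin ps mx j i

def pvChar (ps : List (Int × Int)) (fan mx : Int) (i : Nat) : List (Int × Int × Int) :=
  ((((List.range' 1 (ps.length - 1)).flatMap (pvEmits ps fan mx)).filter (fun e => e.1 == i)).map (·.2))

theorem pvApply_getElem? (L : List (Nat × (Int × Int × Int))) :
    ∀ (b : List (List (Int × Int × Int))) (i : Nat),
      (pvApply b L)[i]? = b[i]?.map (fun l => l ++ (L.filter (fun e => e.1 == i)).map (·.2)) := by
  induction L with
  | nil =>
    intro b i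
    simp [pvApply]
  | cons e L ih =>
    intro b i
    have hstep : pvApply b (e :: L) = pvApply (b.modify e.1 (fun bucket => bucket ++ [e.2])) L := rfl
    rw [hstep, ih]
    rw [List.getElem?_modify]
    by_cases he : e.1 = i
    · simp [he, Option.map_map, Function.comp_def]
    · simp [he]

theorem pvApply_append (b : List (List (Int × Int × Int))) (L1 L2 : List (Nat × (Int × Int × Int))) :
    pvApply b (L1 ++ L2) = pvApply (pvApply b L1) L2 := by
  simp [pvApply, List.foldl_append]

theorem pvInnerB_eq (ps : List (Int × Int)) (t2 f2 mx : Int) :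
    ∀ (ks : List Nat) (b : List (List (Int × Int × Int))), (∀ k ∈ ks, k < ps.length) →
      pvInnerB ps t2 f2 mx (ks.map (fun (k : Nat) => (k : Int))) b
        = pvApply b ((ks.takeWhile (fun k => decide (t2 - (ps[k]!).1 ≤ mx))).map
            (fun k => (k, ((ps[k]!).2, f2, t2 - (ps[k]!).1)))) := by
  intro ks
  induction ks with
  | nil => intro b _; simp [pvInnerB, pvApply]
  | cons k ks ih =>
    intro b h
    have hk : k < ps.length := h k (by simp)
    have hget : PySem.List.pyGet? ps ((k : Nat) : Int) = some ps[k] := by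
      rw [PySem.List.pyGet?_natCast, List.getElem?_eq_getElem hk]
    have hbang : ps[k]! = ps[k] := getElem!_pos ps k hk
    rcases hp : ps[k] with ⟨t1, f1⟩
    have hpb : ps[k]! = (t1, f1) := hbang.trans hp
    have hcons : pvInnerB ps t2 f2 mx ((k :: ks).map (fun (k : Nat) => (k : Int))) b
        = if t2 - t1 > mx then b
          else pvInnerB ps t2 f2 mx (ks.map (fun (k : Nat) => (k : Int)))
                 (b.modify k (fun bucket => bucket ++ [(f1, f2, t2 - t1)])) := by
      show pvInnerB ps t2 f2 mx (((k : Nat) : Int) :: ks.map (fun (k : Nat) => (k : Int))) b = _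
      rw [pvInnerB, hget, hp]
      simp
    rw [hcons]
    by_cases hd : t2 - t1 > mx
    · have hw : decide (t2 - (ps[k]!).1 ≤ mx) = false := by
        rw [hpb]; simp; omega
      have htw : (k :: ks).takeWhile (fun k => decide (t2 - (ps[k]!).1 ≤ mx)) = [] :=
        List.takeWhile_cons_of_neg (by rw [hw]; simp)
      rw [if_pos hd, htw, List.map_nil]
      rfl
    · have hw : decide (t2 - (ps[k]!).1 ≤ mx) = true := by
        rw [hpb]; simp; omega
      have htw : (k :: ks).takeWhile (fun k => decide (t2 - (ps[k]!).1 ≤ mx))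
          = k :: ks.takeWhile (fun k => decide (t2 - (ps[k]!).1 ≤ mx)) :=
        List.takeWhile_cons_of_pos hw
      rw [if_neg hd, htw, List.map_cons]
      rw [ih _ (fun k hk' => h k (by simp [hk']))]
      show pvApply (b.modify k _) _ = pvApply b ((k, ((ps[k]!).2, f2, t2 - (ps[k]!).1)) :: _)
      rw [hpb]
      rfl


theorem pvDesc_cast (fan : Int) (j : Nat) (hj : 1 ≤ j) :
    PySem.List.pyRange ((j : Int) - 1) (max 0 ((j : Int) - fan) - 1) (-1)
      = (pvDesc fan j).map (fun (k : Nat) => (k : Int)) := by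
  rw [PySem.List.pyRange_neg_one]
  unfold pvDesc pvStopN
  rw [List.map_map]
  have hm : ((j : Int) - 1 - (max 0 ((j : Int) - fan) - 1)).toNat = j - (max 0 ((j : Int) - fan)).toNat := by
    omega
  rw [hm]
  apply List.map_congr_left
  intro k hk
  have hk' : k < j - (max 0 ((j : Int) - fan)).toNat := List.mem_range.mp hk
  simp only [Function.comp_apply]
  omega


theorem pv_outer_fold (ps : List (Int × Int)) (fan mx : Int) :
    ∀ (js : List Nat) (b : List (List (Int × Int × Int))), (∀ j ∈ js, 1 ≤ j ∧ j < ps.length) →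
      (js.map (fun (j : Nat) => (j : Int))).foldl
        (fun b j =>
          match PySem.List.pyGet? ps j with
          | none => b
          | some (t2, f2) =>
              pvInnerB ps t2 f2 mx (PySem.List.pyRange (j - 1) (max 0 (j - fan) - 1) (-1)) b) b
      = pvApply b (js.flatMap (pvEmits ps fan mx)) := by
  intro js
  induction js with
  | nil => intro b _; simp [pvApply]
  | cons j js ih =>
    intro b h
    obtain ⟨hj1, hjl⟩ := h j (by simp)
    have hget : PySem.List.pyGet? ps ((j : Nat) : Int) = some ps[j] := by
      rw [PySem.List.pyGet?_natCast, List.getElem?_eq_getElem hjl]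
    have hbang : ps[j]! = ps[j] := getElem!_pos ps j hjl
    rcases hp : ps[j] with ⟨t2, f2⟩
    have hpb : ps[j]! = (t2, f2) := hbang.trans hp
    rw [List.map_cons, List.foldl_cons]
    have hstep :
        (match PySem.List.pyGet? ps ((j : Nat) : Int) with
          | none => b
          | some (t2, f2) =>
              pvInnerB ps t2 f2 mx (PySem.List.pyRange (((j : Nat) : Int) - 1) (max 0 (((j : Nat) : Int) - fan) - 1) (-1)) b)
        = pvApply b (pvEmits ps fan mx j) := by
      rw [hget, hp]
      have hdesc := pvDesc_cast fan j hj1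
      show pvInnerB ps t2 f2 mx (PySem.List.pyRange (((j : Nat) : Int) - 1) (max 0 (((j : Nat) : Int) - fan) - 1) (-1)) b = _
      rw [hdesc, pvInnerB_eq ps t2 f2 mx (pvDesc fan j) b (by
        intro k hk
        unfold pvDesc at hk
        rcases List.mem_map.mp hk with ⟨k', hk', rfl⟩
        have := List.mem_range.mp hk'
        omega)]
      unfold pvEmits pvWin pvPr
      rw [hpb]
    rw [hstep]
    rw [ih _ (fun j' hj' => h j' (by simp [hj']))]
    rw [List.flatMap_cons, pvApply_append]

theorem pvAlt_eq_flat (peaks : List (Int × Int)) (fan mx : Int) :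
    generate_constellation_map_alt peaks fan mx
      = (List.range' 0 (PySem.List.sorted peaks (fun x => x.1)).length).flatMap
          (pvChar (PySem.List.sorted peaks (fun x => x.1)) fan mx) := by
  set ps := PySem.List.sorted peaks (fun x => x.1) with hps
  have h1 : generate_constellation_map_alt peaks fan mx
      = ((PySem.List.pyRange 1 ((ps.length : Int)) 1).foldl
          (fun b j =>
            match PySem.List.pyGet? ps j with
            | none => b
            | some (t2, f2) =>
                pvInnerB ps t2 f2 mx (PySem.List.pyRange (j - 1) (max 0 (j - fan) - 1) (-1)) b)
          ((PySem.List.pyRange 0 ((ps.length : Int)) 1).map (fun _ => []))).flatMap (fun bucket => bucket) := rfl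
  rw [h1]
  have hr1 : PySem.List.pyRange 1 ((ps.length : Int)) 1
      = (List.range' 1 (ps.length - 1)).map (fun (j : Nat) => (j : Int)) := by
    rw [PySem.List.pyRange_one, List.range'_eq_map_range, List.map_map]
    have : ((ps.length : Int) - 1).toNat = ps.length - 1 := by omega
    rw [this]
    apply List.map_congr_left
    intro k hk
    simp
  have hr0 : (PySem.List.pyRange 0 ((ps.length : Int)) 1).map (fun _ => ([] : List (Int × Int × Int)))
      = (List.range ps.length).map (fun _ => []) := by
    rw [PySem.List.pyRange_one, List.map_map]
    have : ((ps.length : Int) - 0).toNat = ps.length := by omega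
    rw [this]
    rfl
  rw [hr1, hr0]
  rw [pv_outer_fold ps fan mx (List.range' 1 (ps.length - 1)) _ (by
    intro j hj
    have := List.mem_range'_1.mp hj
    omega)]
  have hlist : pvApply ((List.range ps.length).map (fun _ => []))
        ((List.range' 1 (ps.length - 1)).flatMap (pvEmits ps fan mx))
      = (List.range' 0 ps.length).map (pvChar ps fan mx) := by
    apply List.ext_getElem?
    intro i
    rw [pvApply_getElem?, List.getElem?_map, List.getElem?_map]
    by_cases hi : i < ps.length
    · rw [List.getElem?_range hi, List.getElem?_range' hi]
      simp [pvChar]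
    · rw [List.getElem?_eq_none (by simpa using hi), List.getElem?_eq_none (by simpa using hi)]
      rfl
  rw [hlist, List.flatMap_map]

theorem pv_flatMap_if {α β : Type} (c : α → Bool) (f : α → β) (l : List α) :
    l.flatMap (fun x => if c x then [f x] else []) = (l.filter c).map f := by
  induction l with
  | nil => rfl
  | cons a t ih =>
    by_cases h : c a <;> simp [h, ih]

-- monotone times from sortedness
theorem pv_mono (ps : List (Int × Int)) (hs : ps.Pairwise (fun a b => a.1 ≤ b.1))
    (p q : Nat) (hpq : p ≤ q) (hq : q < ps.length) : (ps[p]!).1 ≤ (ps[q]!).1 := by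
  have hp : p < ps.length := lt_of_le_of_lt hpq hq |>.trans_le (le_refl _) |>.trans_le (le_refl _)
  rw [getElem!_pos ps p (by omega), getElem!_pos ps q hq]
  rcases eq_or_lt_of_le hpq with rfl | hlt
  · exact le_refl _
  · exact List.pairwise_iff_getElem.mp hs p q (by omega) hq hlt

theorem pvChar_eq_bucket (ps : List (Int × Int)) (fan mx : Int)
    (hs : ps.Pairwise (fun a b => a.1 ≤ b.1)) (hf : 1 ≤ fan) (i : Nat) (hi : i < ps.length) :
    pvChar ps fan mx i = pvBucketA ps fan mx i := by
  have hmono := pv_mono ps hs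
  set n := ps.length with hn
  -- Step A: per-target contribution is a singleton or empty
  have hA : pvChar ps fan mx i
      = (List.range' 1 (n - 1)).flatMap
          (fun j => if i ∈ (pvDesc fan j).takeWhile (pvWin ps mx j) then [pvPr ps i j] else []) := by
    unfold pvChar
    rw [List.filter_flatMap, List.map_flatMap]
    apply List.flatMap_congr
    intro j hj
    unfold pvEmits
    rw [List.filter_map]
    have hcomp : ((fun (e : Nat × (Int × Int × Int)) => e.1 == i) ∘ (fun k => (k, pvPr ps k j)))
        = (fun k => k == i) := rfl
    rw [hcomp, List.map_map]
    have hnd : ((pvDesc fan j).takeWhile (pvWin ps mx j)).Nodup := by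
      apply List.Nodup.sublist (List.takeWhile_sublist _)
      unfold pvDesc
      apply List.Nodup.map_on ?_ List.nodup_range
      intro a ha b hb hab
      have := List.mem_range.mp ha
      have := List.mem_range.mp hb
      omega
    rw [List.filter_beq]
    by_cases hm : i ∈ (pvDesc fan j).takeWhile (pvWin ps mx j)
    · rw [List.count_eq_one_of_mem hnd hm, if_pos hm]
      rfl
    · rw [List.count_eq_zero.mpr hm, if_neg hm]
      rfl
  -- Step B: membership in the per-target takeWhile is the closed condition pvC
  have hB : ∀ j : Nat, 1 ≤ j → j < n →
      ((i ∈ (pvDesc fan j).takeWhile (pvWin ps mx j)) ↔ pvC ps fan mx i j = true) := by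
    intro j hj1 hjn
    have htwf : (pvDesc fan j).takeWhile (pvWin ps mx j) = (pvDesc fan j).filter (pvWin ps mx j) := by
      apply pv_takeWhile_eq_filter _ (fun a b => b < a ∧ a ≤ j - 1)
      · unfold pvDesc
        rw [List.pairwise_map]
        apply List.Pairwise.imp_of_mem ?_ (List.pairwise_lt_range)
        intro a b ha hb hab
        have := List.mem_range.mp ha
        have := List.mem_range.mp hb
        constructor <;> omega
      · intro a b hab hfa
        have hb_lt : b < n := by omega
        have hta := hmono b a (by omega) (by omega)
        unfold pvWin at *
        simp only [decide_eq_false_iff_not] at hfa ⊢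
        intro hle
        exact hfa (by omega)
    rw [htwf, List.mem_filter]
    unfold pvC pvDesc
    constructor
    · rintro ⟨hmem, hwin⟩
      rcases List.mem_map.mp hmem with ⟨k, hk, rfl⟩
      have hkr := List.mem_range.mp hk
      simp only [Bool.and_eq_true, decide_eq_true_eq]
      refine ⟨⟨?_, ?_⟩, hwin⟩
      · unfold pvStopN at hkr; omega
      · unfold pvStopN at hkr; omega
    · rintro h
      simp only [Bool.and_eq_true, decide_eq_true_eq] at h
      obtain ⟨⟨hA', hB'⟩, hW⟩ := h
      refine ⟨List.mem_map.mpr ⟨(j - 1) - i, ?_, by omega⟩, hW⟩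
      rw [List.mem_range]
      unfold pvStopN
      omega
  -- rewrite the if-condition to pvC
  have hAB : pvChar ps fan mx i
      = (List.range' 1 (n - 1)).flatMap (fun j => if pvC ps fan mx i j then [pvPr ps i j] else []) := by
    rw [hA]
    apply List.flatMap_congr
    intro j hj
    have hjr := List.mem_range'_1.mp hj
    exact if_congr (hB j (by omega) (by omega)) rfl rfl
  -- Steps C–G
  rw [hAB, pv_flatMap_if]
  set K := n - 1 - i with hK
  have hD : (List.range' 1 (n - 1)).filter (pvC ps fan mx i)
      = (List.range' (i + 1) K).filter (pvC ps fan mx i) := by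
    have hsplit : List.range' 1 i ++ List.range' (i + 1) K = List.range' 1 (n - 1) := by
      have h0 : List.range' 1 i ++ List.range' (1 + 1 * i) K = List.range' 1 (i + K) :=
        List.range'_append
      rw [show 1 + 1 * i = i + 1 from by omega] at h0
      rw [h0]
      congr 1
      omega
    rw [← hsplit, List.filter_append]
    have hnil : (List.range' 1 i).filter (pvC ps fan mx i) = [] := by
      refine List.filter_eq_nil_iff.mpr ?_
      intro j hj
      have hjr := List.mem_range'_1.mp hj
      unfold pvC
      simp only [Bool.and_eq_true, decide_eq_true_eq, not_and]
      intro _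
      omega
    rw [hnil, List.nil_append]
  rw [hD]
  have hE : (List.range' (i + 1) K).filter (pvC ps fan mx i)
      = (List.range' (i + 1) K).takeWhile (pvC ps fan mx i) := by
    refine (pv_takeWhile_eq_filter _ (fun a b => a < b ∧ i < a ∧ b ≤ n - 1) _ ?_ ?_).symm
    · apply List.Pairwise.imp_of_mem ?_ (List.pairwise_lt_range' 1)
      intro a b ha hb hab
      have := List.mem_range'_1.mp ha
      have := List.mem_range'_1.mp hb
      exact ⟨hab, by omega, by omega⟩
    · rintro a b ⟨hab, hia, hbn⟩ hfa
      by_contra hb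
      have hbt : pvC ps fan mx i b = true := by
        cases hcb : pvC ps fan mx i b with
        | true => rfl
        | false => exact absurd hcb hb
      have hat : pvC ps fan mx i a = true := by
        unfold pvC pvWin at hbt ⊢
        simp only [Bool.and_eq_true, decide_eq_true_eq] at hbt ⊢
        obtain ⟨⟨h1, h2⟩, h3⟩ := hbt
        have hta : (ps[a]!).1 ≤ (ps[b]!).1 := hmono a b (by omega) (by omega)
        exact ⟨⟨by omega, by omega⟩, by omega⟩
      rw [hat] at hfa
      exact absurd hfa (by simp)
  rw [hE]
  set W := ((ps.drop (i + 1)).takeWhile (fun q => decide (q.1 ≤ (ps[i]!).1 + mx))).length with hW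
  set M := min W fan.toNat with hM
  have hKdrop : (ps.drop (i + 1)).length = K := by
    rw [List.length_drop]; omega
  have hWK : W ≤ K := by
    rw [← hKdrop]
    exact (List.takeWhile_sublist _).length_le
  have hMK : M ≤ K := by omega
  have hlenr : (List.range' (i + 1) K).length = K := by simp
  have h1 : ∀ (k : Nat) (hk : k < (List.range' (i + 1) K).length), k < M →
      pvC ps fan mx i ((List.range' (i + 1) K)[k]'hk) = true := by
    intro k hk hkM
    rw [List.getElem_range', show i + 1 + 1 * k = i + 1 + k from by omega]
    have hkK : k < K := by omega
    have hwin : decide (((ps.drop (i + 1))[k]'(by omega)).1 ≤ (ps[i]!).1 + mx) = true :=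
      pv_takeWhile_getElem_true (fun q => decide (q.1 ≤ (ps[i]!).1 + mx)) (ps.drop (i + 1)) k (by omega) (by omega)
    rw [List.getElem_drop] at hwin
    have hj : i + 1 + k < n := by omega
    have hb : ps[i + 1 + k]! = ps[i + 1 + k]'(by omega) := getElem!_pos ps _ (by omega)
    unfold pvC pvWin
    simp only [Bool.and_eq_true, decide_eq_true_eq] at hwin ⊢
    refine ⟨⟨?_, by omega⟩, ?_⟩
    · have : (k : Int) < fan := by
        have : k < fan.toNat := by omega
        omega
      omega
    · rw [hb]
      omega
  have h2 : ∀ (hcl : M < (List.range' (i + 1) K).length),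
      pvC ps fan mx i ((List.range' (i + 1) K)[M]'hcl) = false := by
    intro hcl
    rw [List.getElem_range', show i + 1 + 1 * M = i + 1 + M from by omega]
    have hMK' : M < K := by omega
    by_cases hMfan : M < fan.toNat
    · have hMW : M = W := by omega
      have hwin : decide (((ps.drop (i + 1))[W]'(by omega)).1 ≤ (ps[i]!).1 + mx) = false := by
        have := pv_takeWhile_getElem_false (fun q => decide (q.1 ≤ (ps[i]!).1 + mx)) (ps.drop (i + 1)) (by omega)
        exact this
      rw [List.getElem_drop] at hwin
      have hb : ps[i + 1 + W]! = ps[i + 1 + W]'(by omega) := getElem!_pos ps _ (by omega)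
      unfold pvC pvWin
      simp only [decide_eq_false_iff_not, Bool.and_eq_false_iff] at hwin ⊢
      right
      rw [hMW, hb]
      omega
    · have hMfan' : M = fan.toNat := by omega
      unfold pvC pvWin
      simp only [Bool.and_eq_false_iff, decide_eq_false_iff_not]
      left; left
      have : (fan.toNat : Int) = fan := by omega
      omega
  have htwlen : ((List.range' (i + 1) K).takeWhile (pvC ps fan mx i)).length = M :=
    pv_takeWhile_length_eq _ _ M (by omega) h1 h2
  have hF : (List.range' (i + 1) K).takeWhile (pvC ps fan mx i) = List.range' (i + 1) M := by
    rw [pv_takeWhile_eq_take (pvC ps fan mx i) (List.range' (i + 1) K), htwlen, pv_take_range',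
      min_eq_left hMK]
  rw [hF]
  -- Step G: both sides are the window slice, elementwise
  unfold pvBucketA
  rw [pv_takeWhile_eq_take (fun q => decide (q.1 ≤ (ps[i]!).1 + mx)) (ps.drop (i + 1)), ← hW,
    List.take_take]
  have hminc : min fan.toNat W = M := by omega
  rw [hminc]
  apply List.ext_getElem?
  intro idx
  rw [List.getElem?_map, List.getElem?_map]
  by_cases hidx : idx < M
  · rw [List.getElem?_range' hidx, show i + 1 + 1 * idx = i + 1 + idx from by omega]
    have hidxK : idx < K := by omega
    have hsome : ((ps.drop (i + 1)).take M)[idx]? = some (ps[i + 1 + idx]'(by omega)) := by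
      rw [List.getElem?_take_of_lt hidx, List.getElem?_drop, List.getElem?_eq_getElem (by omega)]
    rw [hsome]
    unfold pvPr
    have hb : ps[i + 1 + idx]! = ps[i + 1 + idx]'(by omega) := getElem!_pos ps _ (by omega)
    simp only [Option.map_some, Option.some.injEq]
    rw [hb]
  · rw [List.getElem?_eq_none (by simp; omega), List.getElem?_eq_none (by simp [hKdrop]; omega)]
    rfl


theorem pvS_eq_idx (ps : List (Int × Int)) (fan mx : Int) :
    ∀ (m k : Nat), ps.length - k = m →
      pvS fan mx (ps.drop k) = (List.range' k (ps.length - k)).flatMap (pvBucketA ps fan mx) := by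
  intro m
  induction m with
  | zero =>
    intro k hm
    have hd : ps.drop k = [] := List.drop_eq_nil_iff.mpr (by omega)
    rw [hd, hm]
    rfl
  | succ n ih =>
    intro k hm
    have hk : k < ps.length := by omega
    have hd : ps.drop k = ps[k] :: ps.drop (k + 1) := (List.getElem_cons_drop hk).symm
    have hm' : ps.length - k = n + 1 := hm
    rw [hm', List.range'_succ, List.flatMap_cons, hd]
    rcases hp : ps[k] with ⟨t1, f1⟩
    have hpb : ps[k]! = (t1, f1) := (getElem!_pos ps k hk).trans hp
    show ((( (ps.drop (k+1)).takeWhile (fun q => q.1 ≤ t1 + mx)).take fan.toNat).map (fun q => (f1, q.2, q.1 - t1)))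
        ++ pvS fan mx (ps.drop (k+1)) = _
    rw [ih (k + 1) (by omega)]
    have : ps.length - (k + 1) = n := by omega
    rw [this]
    unfold pvBucketA
    rw [hpb]

-- ---------- A-side characterization (scan-and-break loop = capped window) ----------
theorem pv_inner_eq (fan mx t1 f1 : Int) (rest : List (Int × Int)) :
    ∀ (fc : Int), fc < fan →
      pvInnerA fan mx t1 f1 rest fc
        = ((rest.takeWhile (fun q => q.1 ≤ t1 + mx)).take (fan - fc).toNat).map
            (fun q => (f1, q.2, q.1 - t1)) := by
  induction rest with
  | nil => intro fc h; simp [pvInnerA]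
  | cons p r ih =>
    intro fc h
    obtain ⟨t2, f2⟩ := p
    by_cases hd : t2 - t1 > mx
    · have hnle : ¬ ((t2, f2).1 ≤ t1 + mx) := by simp; omega
      simp [pvInnerA, hd, hnle]
    · have hle : ((t2, f2).1 ≤ t1 + mx) := by simp; omega
      have hn : (fan - fc).toNat = (fan - (fc + 1)).toNat + 1 := by omega
      by_cases hb : fc + 1 ≥ fan
      · have h0 : (fan - (fc + 1)).toNat = 0 := by omega
        simp [pvInnerA, hd, hle, hn, h0, hb]
      · have ih' := ih (fc + 1) (by omega)
        simp [pvInnerA, hd, hle, hn, hb, ih']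

theorem pv_outerA_eq (fan mx : Int) (hf : 1 ≤ fan) :
    ∀ ps : List (Int × Int), pvOuterA fan mx ps = pvS fan mx ps := by
  intro ps
  induction ps with
  | nil => rfl
  | cons p rest ih =>
    obtain ⟨t1, f1⟩ := p
    have h := pv_inner_eq fan mx t1 f1 rest 0 (by omega)
    simp only [pvOuterA, pvS, ih, h]
    norm_num

theorem pv_outerA_nil (fan mx : Int) :
    ∀ ps : List (Int × Int), pvHasClose mx (ps.map Prod.fst) = false →
      pvOuterA fan mx ps = [] := by
  intro ps
  induction ps with
  | nil => intro _; rfl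
  | cons p rest ih =>
    intro h
    obtain ⟨t1, f1⟩ := p
    cases rest with
    | nil => simp [pvOuterA, pvInnerA]
    | cons q r =>
      obtain ⟨t2, f2⟩ := q
      simp only [List.map_cons, pvHasClose, Bool.or_eq_false_iff, decide_eq_false_iff_not] at h
      obtain ⟨h1, h2⟩ := h
      have hrest : pvOuterA fan mx ((t2, f2) :: r) = [] := by
        apply ih; simpa using h2
      simp [pvOuterA, pvInnerA, show t2 - t1 > mx by omega] at hrest ⊢
      exact hrest

theorem pv_outerA_ne_nil (fan mx : Int) :
    ∀ ps : List (Int × Int), pvHasClose mx (ps.map Prod.fst) = true →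
      pvOuterA fan mx ps ≠ [] := by
  intro ps
  induction ps with
  | nil => intro h; simp [pvHasClose] at h
  | cons p rest ih =>
    intro h
    obtain ⟨t1, f1⟩ := p
    cases rest with
    | nil => simp [pvHasClose] at h
    | cons q r =>
      obtain ⟨t2, f2⟩ := q
      simp only [List.map_cons, pvHasClose, Bool.or_eq_true, decide_eq_true_eq] at h
      rcases h with h1 | h2
      · simp [pvOuterA, pvInnerA, show ¬ (t2 - t1 > mx) by omega]
      · have hne := ih (by simpa [pvHasClose] using h2)
        show pvInnerA fan mx t1 f1 ((t2, f2) :: r) 0 ++ pvOuterA fan mx ((t2, f2) :: r) ≠ []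
        intro hn
        exact hne (List.append_eq_nil_iff.mp hn).2

theorem pv_map_fst_sorted (peaks : List (Int × Int)) :
    (PySem.List.sorted peaks (fun x => x.1)).map Prod.fst
      = PySem.List.sorted (peaks.map Prod.fst) (fun x => x) := by
  have h1 : ((PySem.List.sorted peaks (fun x => x.1)).map Prod.fst).Perm (peaks.map Prod.fst) :=
    (PySem.List.sorted_perm peaks (fun x => x.1) false).map Prod.fst
  have h2 : (((PySem.List.sorted peaks (fun x => x.1)).map Prod.fst)).Pairwise (· ≤ ·) :=
    PySem.List.sorted_map_key_pairwise peaks (fun x => x.1)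
  exact (PySem.List.sorted_id_eq_of_perm_of_pairwise (peaks.map Prod.fst) _ h1 h2).symm

theorem pvB_nil (peaks : List (Int × Int)) (fan mx : Int) (hf : fan ≤ 0) :
    generate_constellation_map_alt peaks fan mx = [] := by
  set ps := PySem.List.sorted peaks (fun x => x.1) with hps
  have h1 : generate_constellation_map_alt peaks fan mx
      = ((PySem.List.pyRange 1 ((ps.length : Int)) 1).foldl
          (fun b j =>
            match PySem.List.pyGet? ps j with
            | none => b
            | some (t2, f2) =>
                pvInnerB ps t2 f2 mx (PySem.List.pyRange (j - 1) (max 0 (j - fan) - 1) (-1)) b)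
          ((PySem.List.pyRange 0 ((ps.length : Int)) 1).map (fun _ => []))).flatMap (fun bucket => bucket) := rfl
  rw [h1]
  have hfold : ∀ (js : List Int) (b : List (List (Int × Int × Int))), (∀ j ∈ js, 1 ≤ j) →
      js.foldl
        (fun b j =>
          match PySem.List.pyGet? ps j with
          | none => b
          | some (t2, f2) =>
              pvInnerB ps t2 f2 mx (PySem.List.pyRange (j - 1) (max 0 (j - fan) - 1) (-1)) b) b = b := by
    intro js
    induction js with
    | nil => intro b _; rfl
    | cons j js ih =>
      intro b h
      have hj : 1 ≤ j := h j (by simp)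
      have hnil : PySem.List.pyRange (j - 1) (max 0 (j - fan) - 1) (-1) = [] :=
        PySem.List.pyRange_neg_one_eq_nil (by omega)
      rw [List.foldl_cons]
      have hstep : (match PySem.List.pyGet? ps j with
          | none => b
          | some (t2, f2) =>
              pvInnerB ps t2 f2 mx (PySem.List.pyRange (j - 1) (max 0 (j - fan) - 1) (-1)) b) = b := by
        cases PySem.List.pyGet? ps j with
        | none => rfl
        | some p => rcases p with ⟨t2, f2⟩; rw [hnil]; rfl
      rw [hstep]
      exact ih b (fun j' hj' => h j' (by simp [hj']))
  rw [hfold _ _ (by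
    intro j hj
    rw [PySem.List.pyRange_one] at hj
    rcases List.mem_map.mp hj with ⟨k, _, rfl⟩
    omega)]
  rw [List.flatMap_map]
  simp

-- ===== VERDICT (by name: the statement is the Claim_ definition above) =====
theorem generate_constellation_map_spec : Claim_unchanged_generate_constellation_map := by
  intro peaks fan mx _ hnd
  show generate_constellation_map peaks fan mx = generate_constellation_map_alt peaks fan mx
  by_cases hf : 1 ≤ fan
  · rw [pvAlt_eq_flat]
    have hs := PySem.List.sorted_pairwise peaks (fun x => x.1)
    have hS := pvS_eq_idx (PySem.List.sorted peaks (fun x => x.1)) fan mx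
        (PySem.List.sorted peaks (fun x => x.1)).length 0 (by omega)
    show pvOuterA fan mx (PySem.List.sorted peaks (fun x => x.1)) = _
    rw [pv_outerA_eq fan mx hf]
    simp only [List.drop_zero, Nat.sub_zero] at hS
    rw [hS]
    refine List.flatMap_congr (fun i hi => ?_) |>.symm
    exact pvChar_eq_bucket _ fan mx hs hf i (by
      have := List.mem_range'_1.mp hi; omega)
  · have hfan : fan ≤ 0 := by omega
    have hclose : pvHasClose mx (PySem.List.sorted (peaks.map Prod.fst) (fun x => x)) = false := by
      by_contra hc
      exact hnd ⟨hfan, by simpa using hc⟩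
    rw [pvB_nil peaks fan mx hfan]
    show pvOuterA fan mx (PySem.List.sorted peaks (fun x => x.1)) = _
    apply pv_outerA_nil
    rw [pv_map_fst_sorted]
    exact hclose

theorem generate_constellation_map_changed : Claim_changed_generate_constellation_map := by
  unfold Claim_changed_generate_constellation_map; decide

theorem generate_constellation_map_tight : Claim_exact_generate_constellation_map := by
  intro peaks fan mx _ hd
  obtain ⟨hfan, hclose⟩ := hd
  rw [pvB_nil peaks fan mx hfan]
  apply pv_outerA_ne_nil
  rw [pv_map_fst_sorted]
  exact hclose
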